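-- pv_equiv track=rewrite | github.com/DKYaMaTo/Python | Python recursive.py | sumNegative
-- ===== SOURCE A (Python) =====
-- def sumNegative(dataArray, i, j):
--     if j <= i:
--
--         if dataArray[j] < 0:
--             return dataArray[j] + sumNegative(dataArray, i, j + 1)
--
--         else:
--             return sumNegative(dataArray, i, j + 1)
--     else:
--         return 0
-- ===== SOURCE B (Python) =====
-- def sumNegative(dataArray, i, j):
--     total = 0
--     for k in range(j, i + 1):
--         if dataArray[k] < 0:
--             total += dataArray[k]
--     return total
-- ===== Notes on version B (the rewrite author's own statement) =====
-- stated objective: idiomatic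
-- what changed: Replaces the linear recursion over j with an iterative accumulator loop over range(j, i+1).
import Mathlib
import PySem

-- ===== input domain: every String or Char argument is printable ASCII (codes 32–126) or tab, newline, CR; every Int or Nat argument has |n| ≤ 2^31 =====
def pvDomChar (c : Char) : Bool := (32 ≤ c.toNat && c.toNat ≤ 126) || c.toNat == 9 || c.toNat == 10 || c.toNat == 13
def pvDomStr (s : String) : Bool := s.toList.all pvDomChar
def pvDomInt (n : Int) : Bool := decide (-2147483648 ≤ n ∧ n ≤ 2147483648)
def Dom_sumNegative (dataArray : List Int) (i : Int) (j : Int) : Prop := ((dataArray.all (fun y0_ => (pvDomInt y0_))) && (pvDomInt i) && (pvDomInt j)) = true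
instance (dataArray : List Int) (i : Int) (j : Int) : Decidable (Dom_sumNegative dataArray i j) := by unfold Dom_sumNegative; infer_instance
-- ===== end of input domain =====

-- B replaces A's linear recursion with an iterative accumulator loop (idiomatic; same cost).


-- ===== PORT A =====
-- literal port of A's recursion; 'none' from pyGet? is Python's IndexError, excluded by Pre_
def sumNegative (dataArray : List Int) (i : Int) (j : Int) : Int :=
  if _h : j ≤ i then
    match PySem.List.pyGet? dataArray j with
    | some v =>
        if v < 0 then v + sumNegative dataArray i (j + 1)
        else sumNegative dataArray i (j + 1)
    | none => 0   -- IndexError in Python; outside Pre_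
  else 0
termination_by (i + 1 - j).toNat
decreasing_by all_goals omega

-- ===== PORT B =====
-- iterative loop: total = 0; for k in range(j, i+1): if dataArray[k] < 0: total += dataArray[k]
def sumNegative_alt (dataArray : List Int) (i : Int) (j : Int) : Int :=
  (PySem.List.pyRange j (i + 1) 1).foldl
    (fun total k =>
      match PySem.List.pyGet? dataArray k with
      | some v => if v < 0 then total + v else total
      | none => total)   -- IndexError in Python; outside Pre_
    0

-- ===== PRECONDITION & SPEC =====
-- Pre_ excludes exactly the inputs on which A raises IndexError (some index in [j, i] out of range).
def Pre_sumNegative (dataArray : List Int) (i : Int) (j : Int) : Prop :=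
  i < j ∨ (-(dataArray.length : Int) ≤ j ∧ i < (dataArray.length : Int))
instance (dataArray : List Int) (i : Int) (j : Int) : Decidable (Pre_sumNegative dataArray i j) := by
  unfold Pre_sumNegative; infer_instance

def pvWitness_sumNegative : List Int × Int × Int := ([3, -2, 5, -7], 3, 0)

def Spec_sumNegative (dataArray : List Int) (i : Int) (j : Int) (out : Int) : Prop := out = sumNegative_alt dataArray i j
instance (dataArray : List Int) (i : Int) (j : Int) (out : Int) : Decidable (Spec_sumNegative dataArray i j out) := by unfold Spec_sumNegative; infer_instance

-- ===== CLAIM (what is proved, stated in full; the proofs are below) =====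
def Claim_equal_sumNegative : Prop := ∀ (dataArray : List Int) (i : Int) (j : Int), Dom_sumNegative dataArray i j → Pre_sumNegative dataArray i j → Spec_sumNegative dataArray i j (sumNegative dataArray i j)

-- ===== LEMMAS AND PROOFS =====

def pvNegAt (dataArray : List Int) (k : Int) : Int :=
  match PySem.List.pyGet? dataArray k with
  | some v => if v < 0 then v else 0
  | none => 0

theorem alt_eq_sum (dataArray : List Int) (i j : Int) :
    sumNegative_alt dataArray i j = ((PySem.List.pyRange j (i + 1) 1).map (pvNegAt dataArray)).sum := by
  unfold sumNegative_alt
  have hstep : (fun (total : Int) (k : Int) =>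
      match PySem.List.pyGet? dataArray k with
      | some v => if v < 0 then total + v else total
      | none => total)
      = fun (total : Int) (k : Int) => total + pvNegAt dataArray k := by
    funext total k
    unfold pvNegAt
    cases PySem.List.pyGet? dataArray k with
    | none => simp
    | some v => simp only []; split_ifs <;> simp
  rw [hstep, PySem.List.foldl_add]
  simp

theorem a_eq_sum (n : Nat) : ∀ (dataArray : List Int) (i j : Int),
    (i + 1 - j).toNat = n → Pre_sumNegative dataArray i j →
    sumNegative dataArray i j = ((PySem.List.pyRange j (i + 1) 1).map (pvNegAt dataArray)).sum := by
  induction n with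
  | zero =>
    intro dataArray i j hn _
    have hji : ¬ j ≤ i := by omega
    rw [sumNegative]
    simp [hji]
    have : PySem.List.pyRange j (i + 1) 1 = [] := by
      rw [PySem.List.pyRange_one]
      have : (i + 1 - j).toNat = 0 := hn
      simp [this]
    simp [this]
  | succ m ih =>
    intro dataArray i j hn hpre
    have hji : j ≤ i := by omega
    have hrange : PySem.Raise.InRange dataArray.length j := by
      rcases hpre with h | ⟨h1, h2⟩
      · omega
      · constructor <;> omega
    obtain ⟨v, hv⟩ : ∃ v, PySem.List.pyGet? dataArray j = some v := by
      cases hg : PySem.List.pyGet? dataArray j with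
      | none => exact absurd ((PySem.List.pyGet?_eq_none_iff _ _).mp hg) (not_not_intro hrange)
      | some v => exact ⟨v, rfl⟩
    have hcons : PySem.List.pyRange j (i + 1) 1 = j :: PySem.List.pyRange (j + 1) (i + 1) 1 :=
      PySem.List.pyRange_one_cons (by omega)
    have hpre' : Pre_sumNegative dataArray i (j + 1) := by
      rcases hpre with h | ⟨h1, h2⟩
      · exact Or.inl (by omega)
      · exact Or.inr ⟨by omega, h2⟩
    have hrec := ih dataArray i (j + 1) (by omega) hpre'
    rw [sumNegative]
    simp only [hji, dif_pos, hv]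
    rw [hcons]
    simp only [List.map_cons, List.sum_cons, pvNegAt, hv]
    split_ifs with hneg
    · rw [hrec]
    · simp [hrec]

-- ===== VERDICT (by name: the statement is the Claim_ definition above) =====
theorem sumNegative_spec : Claim_equal_sumNegative := by
  intro dataArray i j _ hpre
  unfold Spec_sumNegative
  rw [alt_eq_sum, a_eq_sum (i + 1 - j).toNat dataArray i j rfl hpre]
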